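-- pv_equiv track=rewrite | github.com/Azumayuk1/Python_All_Labs_5semester | main.py | Lab5_findLongestRepeatingNumbersRow
-- ===== SOURCE A (Python) =====
-- def Lab5_findLongestRepeatingNumbersRow(array):
--     maxCount = 0
--     longest_found_row = int(-1)
--
--     for row_index, row in enumerate(array):
--         actualCount = 1
--         for column_index, column in enumerate(row):
--             if column_index == len(row) - 1:
--                 break
--             if column == row[column_index + 1]:
--                 actualCount += 1
--             else:
--                 actualCount = 1
--             if actualCount > maxCount:
--                 maxCount = actualCount
--                 longest_found_row = row_index
--
--     return longest_found_row
-- ===== SOURCE B (Python) =====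
-- def Lab5_findLongestRepeatingNumbersRow(array):
--     # Phase 1: longest run of equal consecutive elements per row (0 for rows shorter than 2)
--     runs = []
--     for row in array:
--         if len(row) < 2:
--             runs.append(0)
--             continue
--         prev = row[0]
--         cur = 1
--         best = 1
--         for x in row[1:]:
--             cur = cur + 1 if x == prev else 1
--             if cur > best:
--                 best = cur
--             prev = x
--         runs.append(best)
--     # Phase 2: first row achieving the maximum run (if any run is positive)
--     m = max(runs, default=0)
--     return runs.index(m) if m > 0 else -1
-- ===== Notes on version B (the rewrite author's own statement) =====
-- stated objective: idiomatic
-- what changed: B first computes the longest run of equal consecutive elements per row with a prev-based scan (no enumerate/index lookahead), then finds the answer in a separate argmax step via max() and list.index(), instead of A's interleaved global max/row tracking with row[i+1] indexing inside the loop.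
import Mathlib
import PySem

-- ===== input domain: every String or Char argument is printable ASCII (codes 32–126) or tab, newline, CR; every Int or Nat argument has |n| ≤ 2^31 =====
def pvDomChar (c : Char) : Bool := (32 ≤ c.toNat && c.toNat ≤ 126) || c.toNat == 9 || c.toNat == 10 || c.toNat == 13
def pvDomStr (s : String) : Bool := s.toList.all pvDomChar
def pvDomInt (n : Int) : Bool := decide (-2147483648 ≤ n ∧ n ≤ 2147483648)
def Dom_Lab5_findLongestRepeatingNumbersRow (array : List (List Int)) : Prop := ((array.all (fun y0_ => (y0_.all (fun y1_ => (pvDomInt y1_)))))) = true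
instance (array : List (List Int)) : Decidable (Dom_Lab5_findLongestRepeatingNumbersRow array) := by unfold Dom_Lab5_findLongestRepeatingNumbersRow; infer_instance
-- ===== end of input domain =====

-- B separates the work into a per-row longest-run pass followed by a max/index argmax pass,
-- instead of A's interleaved global max tracking; objective: idiomatic, same asymptotic cost.

-- ===== PORT A =====
-- inner loop of A over enumerate(row); breaks at the last index, so row[ci+1]
-- is always in range where it is read and '.getD 0' is exact there
def pvA_inner (row : List Int) (rowIndex : Int) :
    Int × Int × Int → List (Int × Int) → Int × Int × Int
  | s, [] => s
  | (ac, mc, lf), (ci, col) :: rest =>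
    if ci = (row.length : Int) - 1 then (ac, mc, lf)        -- break
    else
      let ac' := if col = (PySem.List.pyGet? row (ci + 1)).getD 0 then ac + 1 else 1
      if ac' > mc then pvA_inner row rowIndex (ac', ac', rowIndex) rest
      else pvA_inner row rowIndex (ac', mc, lf) rest

def Lab5_findLongestRepeatingNumbersRow (array : List (List Int)) : Int :=
  let s := (PySem.List.enumerate array).foldl
    (fun (s : Int × Int) (p : Int × List Int) =>
      (pvA_inner p.2 p.1 (1, s.1, s.2) (PySem.List.enumerate p.2)).2) (0, -1)
  s.2

-- ===== PORT B =====
def pvB_go (prev cur best : Int) : List Int → Int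
  | [] => best
  | x :: xs =>
    let cur' := if x = prev then cur + 1 else 1
    let best' := if cur' > best then cur' else best
    pvB_go x cur' best' xs

def pvB_run (row : List Int) : Int :=
  if row.length < 2 then 0
  else match row with
    | [] => 0                       -- unreachable (length ≥ 2)
    | x :: xs => pvB_go x 1 1 xs

def Lab5_findLongestRepeatingNumbersRow_alt (array : List (List Int)) : Int :=
  let runs := array.map pvB_run
  let m := (PySem.List.max? runs (fun x => x)).getD 0       -- max(runs, default=0)
  if m > 0 then ((PySem.List.index? runs m).getD 0 : Int)   -- runs.index(m); m ∈ runs here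
  else -1

-- ===== PRECONDITION & SPEC =====
def Spec_Lab5_findLongestRepeatingNumbersRow (array : List (List Int)) (out : Int) : Prop := out = Lab5_findLongestRepeatingNumbersRow_alt array
instance (array : List (List Int)) (out : Int) : Decidable (Spec_Lab5_findLongestRepeatingNumbersRow array out) := by unfold Spec_Lab5_findLongestRepeatingNumbersRow; infer_instance

-- ===== CLAIM (what is proved, stated in full; the proofs are below) =====
def Claim_equal_Lab5_findLongestRepeatingNumbersRow : Prop := ∀ (array : List (List Int)), Dom_Lab5_findLongestRepeatingNumbersRow array → Spec_Lab5_findLongestRepeatingNumbersRow array (Lab5_findLongestRepeatingNumbersRow array)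

-- ===== LEMMAS AND PROOFS =====

-- adjacent pairs of a row: zip row row.tail
def pvPairs : List Int → List (Int × Int)
  | x :: y :: rest => (x, y) :: pvPairs (y :: rest)
  | _ => []

-- A's inner loop, re-expressed as a scan over the adjacent pairs
def pvScanP (i : Int) : Int × Int × Int → List (Int × Int) → Int × Int × Int
  | s, [] => s
  | (ac, mc, lf), (a, b) :: rest =>
    let ac' := if a = b then ac + 1 else 1
    if ac' > mc then pvScanP i (ac', ac', i) rest
    else pvScanP i (ac', mc, lf) rest

-- maximum of the run-length sequence over the pairs (0 if no pairs)
def pvMrun (ac : Int) : List (Int × Int) → Int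
  | [] => 0
  | (a, b) :: rest =>
    let ac' := if a = b then ac + 1 else 1
    max ac' (pvMrun ac' rest)

-- the outer argmax scan over the per-row run lengths
def pvScanR : Int → Int × Int → List Int → Int × Int
  | _, s, [] => s
  | i, (mc, lf), r :: rest =>
    pvScanR (i + 1) (if r > mc then (r, i) else (mc, lf)) rest

def pvMaxL : List Int → Int
  | [] => 0
  | r :: rest => max r (pvMaxL rest)

theorem pvMrun_pos (a b : Int) (rest : List (Int × Int)) (ac : Int) (h : 0 ≤ ac) :
    1 ≤ pvMrun ac ((a, b) :: rest) := by
  simp only [pvMrun]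
  refine le_trans ?_ (le_max_left _ _)
  split_ifs <;> omega

theorem pvA_inner_eq_scanP (row : List Int) (i : Int) :
    ∀ (suf : List Int) (k : Nat) (s : Int × Int × Int), row.drop k = suf →
    pvA_inner row i s (PySem.List.enumerate suf (k : Int)) = pvScanP i s (pvPairs suf) := by
  intro suf
  induction suf with
  | nil =>
    intro k s _
    simp [pvA_inner, pvPairs, pvScanP, PySem.List.enumerate_nil]
  | cons x t ih =>
    intro k s hdrop
    have hlen : row.length = k + (t.length + 1) := by
      have h1 := congrArg List.length hdrop
      simp only [List.length_drop, List.length_cons] at h1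
      have h2 : k < row.length := by
        by_contra hk
        rw [List.drop_eq_nil_of_le (by omega)] at hdrop
        simp at hdrop
      omega
    rw [PySem.List.enumerate_cons]
    obtain ⟨ac, mc, lf⟩ := s
    cases t with
    | nil =>
      simp only [List.length_nil] at hlen
      simp only [pvA_inner]
      rw [if_pos (show (k : Int) = (row.length : Int) - 1 by omega)]
      rfl
    | cons y r =>
      simp only [List.length_cons] at hlen
      have hne : (k : Int) ≠ (row.length : Int) - 1 := by omega
      have hget : PySem.List.pyGet? row ((k : Int) + 1) = some y := by
        have h1 : ((k : Int) + 1) = ((k + 1 : Nat) : Int) := by push_cast; ring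
        rw [h1, PySem.List.pyGet?_natCast]
        have h2 : (row.drop k)[1]? = row[k + 1]? := by
          rw [List.getElem?_drop]
        rw [← h2, hdrop]
        rfl
      have hd : row.drop (k + 1) = y :: r := by
        have h3 := congrArg (List.drop 1) hdrop
        rw [List.drop_drop] at h3
        simpa using h3
      simp only [pvA_inner]
      rw [if_neg hne, hget]
      simp only [Option.getD_some]
      rw [show pvPairs (x :: y :: r) = (x, y) :: pvPairs (y :: r) from rfl]
      simp only [pvScanP]
      have h2 : ((k : Int) + 1) = ((k + 1 : Nat) : Int) := by push_cast; ring
      rw [h2]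
      split_ifs
      all_goals exact ih (k + 1) _ hd

theorem ite_pair {c : Prop} [inst : Decidable c] (x y z w : Int) :
    (if c then (x, y) else (z, w)) = ((if c then x else z), (if c then y else w)) := by
  split_ifs <;> rfl

theorem pvScanP_eq (i : Int) :
    ∀ (pairs : List (Int × Int)) (ac mc lf : Int), 0 ≤ mc →
    (pvScanP i (ac, mc, lf) pairs).2 =
      if pvMrun ac pairs > mc then (pvMrun ac pairs, i) else (mc, lf) := by
  intro pairs
  induction pairs with
  | nil =>
    intro ac mc lf h
    rw [show pvMrun ac [] = 0 from rfl, if_neg (by omega)]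
    rfl
  | cons p rest ih =>
    obtain ⟨a, b⟩ := p
    intro ac mc lf h
    simp only [pvScanP, pvMrun]
    set ac' := (if a = b then ac + 1 else 1) with hac
    set M := pvMrun ac' rest with hMr
    have hm1 : ac' ≤ max ac' M := le_max_left _ _
    have hm2 : M ≤ max ac' M := le_max_right _ _
    have hm3 := max_choice ac' M
    by_cases h1 : ac' > mc
    · rw [if_pos h1, ih _ _ _ (by omega)]
      rw [← hMr, ite_pair, ite_pair]
      simp only [Prod.mk.injEq]
      constructor <;> split_ifs <;> omega
    · rw [if_neg h1, ih _ _ _ h]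
      rw [← hMr, ite_pair, ite_pair]
      simp only [Prod.mk.injEq]
      constructor <;> split_ifs <;> omega

theorem pvB_go_eq : ∀ (xs : List Int) (prev cur best : Int), 0 ≤ best →
    pvB_go prev cur best xs = max best (pvMrun cur (pvPairs (prev :: xs)))
  | [], prev, cur, best, h => by
    rw [show pvPairs [prev] = [] from rfl, show pvMrun cur [] = 0 from rfl]
    simp only [pvB_go]
    exact (max_eq_left h).symm
  | x :: xs, prev, cur, best, h => by
    simp only [pvB_go]
    rw [show pvPairs (prev :: x :: xs) = (prev, x) :: pvPairs (x :: xs) from rfl]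
    simp only [pvMrun]
    have hcond : (if prev = x then cur + 1 else 1) = (if x = prev then cur + 1 else 1) := by
      by_cases hc : x = prev
      · rw [if_pos hc, if_pos hc.symm]
      · rw [if_neg hc, if_neg (fun he => hc he.symm)]
    rw [hcond]
    have hbest : (if (if x = prev then cur + 1 else 1) > best then (if x = prev then cur + 1 else 1) else best)
        = max best (if x = prev then cur + 1 else 1) := by
      rw [max_def]; split_ifs <;> omega
    rw [hbest, pvB_go_eq xs x _ _ (le_trans h (le_max_left _ _))]
    exact max_assoc best _ _

theorem pvB_run_nonneg (row : List Int) : 0 ≤ pvB_run row := by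
  unfold pvB_run
  split_ifs with h
  · exact le_refl 0
  · cases row with
    | nil => exact le_refl 0
    | cons x xs =>
      show 0 ≤ pvB_go x 1 1 xs
      rw [pvB_go_eq xs x 1 1 (by omega)]
      exact le_trans (by omega) (le_max_left 1 _)

theorem pvRow_step (row : List Int) (i mc lf : Int) (hmc : 0 ≤ mc) :
    (pvA_inner row i (1, mc, lf) (PySem.List.enumerate row)).2 =
      if pvB_run row > mc then (pvB_run row, i) else (mc, lf) := by
  have h0 : PySem.List.enumerate row = PySem.List.enumerate row ((0 : Nat) : Int) := by norm_num
  rw [h0, pvA_inner_eq_scanP row i row 0 _ (by simp), pvScanP_eq i (pvPairs row) 1 mc lf hmc]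
  match row with
  | [] => rfl
  | [x] => rfl
  | x :: y :: t =>
    rw [show pvPairs (x :: y :: t) = (x, y) :: pvPairs (y :: t) from rfl]
    have hrun : pvB_run (x :: y :: t) = pvMrun 1 ((x, y) :: pvPairs (y :: t)) := by
      unfold pvB_run
      rw [if_neg (by simp)]
      show pvB_go x 1 1 (y :: t) = pvMrun 1 ((x, y) :: pvPairs (y :: t))
      rw [pvB_go_eq (y :: t) x 1 1 (by omega)]
      rw [show pvPairs (x :: y :: t) = (x, y) :: pvPairs (y :: t) from rfl]
      exact max_eq_right (pvMrun_pos x y _ 1 (by omega))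
    rw [hrun]

theorem pvOuter_eq : ∀ (array : List (List Int)) (k : Nat) (mc lf : Int), 0 ≤ mc →
    (PySem.List.enumerate array (k : Int)).foldl
      (fun (s : Int × Int) (p : Int × List Int) =>
        (pvA_inner p.2 p.1 (1, s.1, s.2) (PySem.List.enumerate p.2)).2) (mc, lf)
      = pvScanR (k : Int) (mc, lf) (array.map pvB_run) := by
  intro array
  induction array with
  | nil => intro k mc lf _; simp [pvScanR, PySem.List.enumerate_nil]
  | cons row rest ih =>
    intro k mc lf h
    rw [PySem.List.enumerate_cons, List.foldl_cons]
    rw [show (row :: rest).map pvB_run = pvB_run row :: rest.map pvB_run from rfl]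
    simp only [pvScanR]
    rw [pvRow_step row (k : Int) mc lf h]
    have h2 : (k : Int) + 1 = ((k + 1 : Nat) : Int) := by push_cast; ring
    rw [h2]
    by_cases hgt : pvB_run row > mc
    · rw [if_pos hgt]
      exact ih (k + 1) _ _ (pvB_run_nonneg row)
    · rw [if_neg hgt]
      exact ih (k + 1) mc lf h

theorem pvMaxL_ge : ∀ (runs : List Int) (x : Int), x ∈ runs → x ≤ pvMaxL runs := by
  intro runs
  induction runs with
  | nil => intro x hx; exact absurd hx (List.not_mem_nil)
  | cons r rest ih =>
    intro x hx
    rcases List.mem_cons.mp hx with h | h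
    · rw [h, show pvMaxL (r :: rest) = max r (pvMaxL rest) from rfl]
      exact le_max_left _ _
    · exact le_trans (ih x h) (le_max_right _ _)

theorem pvMaxL_mem : ∀ (runs : List Int), runs ≠ [] → (∀ r ∈ runs, 0 ≤ r) →
    pvMaxL runs ∈ runs := by
  intro runs
  induction runs with
  | nil => intro h _; exact absurd rfl h
  | cons r rest ih =>
    intro _ hnn
    rw [show pvMaxL (r :: rest) = max r (pvMaxL rest) from rfl]
    cases rest with
    | nil =>
      rw [show pvMaxL ([] : List Int) = 0 from rfl, max_eq_left (hnn r (by simp))]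
      exact List.mem_cons_self
    | cons a t =>
      rcases max_cases r (pvMaxL (a :: t)) with ⟨he, _⟩ | ⟨he, _⟩ <;> rw [he]
      · exact List.mem_cons_self
      · exact List.mem_cons_of_mem r (ih (by simp) (fun x hx => hnn x (List.mem_cons_of_mem r hx)))

theorem pvMaxL_mem' (runs : List Int) (h : ∀ r ∈ runs, 0 ≤ r) (hpos : 0 < pvMaxL runs) :
    pvMaxL runs ∈ runs := by
  cases runs with
  | nil => exact absurd hpos (by rw [show pvMaxL [] = 0 from rfl]; omega)
  | cons r rest => exact pvMaxL_mem (r :: rest) (by simp) h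

theorem pvScanR_eq : ∀ (runs : List Int) (k : Nat) (mc lf : Int), 0 ≤ mc →
    (∀ r ∈ runs, 0 ≤ r) →
    pvScanR (k : Int) (mc, lf) runs =
      if pvMaxL runs > mc then
        (pvMaxL runs, (k : Int) + (((PySem.List.index? runs (pvMaxL runs)).getD 0 : Nat) : Int))
      else (mc, lf) := by
  intro runs
  induction runs with
  | nil =>
    intro k mc lf h _
    rw [show pvMaxL [] = 0 from rfl, if_neg (by omega)]
    rfl
  | cons r rest ih =>
    intro k mc lf hmc hnn
    have hr : 0 ≤ r := hnn r (by simp)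
    have hrest : ∀ x ∈ rest, 0 ≤ x := fun x hx => hnn x (List.mem_cons_of_mem r hx)
    have hMnn : 0 ≤ pvMaxL rest := by
      cases rest with
      | nil => rw [show pvMaxL [] = 0 from rfl]
      | cons a t => exact le_trans (hrest a (by simp)) (pvMaxL_ge (a :: t) a (by simp))
    simp only [pvScanR]
    have h2 : (k : Int) + 1 = ((k + 1 : Nat) : Int) := by push_cast; ring
    rw [show pvMaxL (r :: rest) = max r (pvMaxL rest) from rfl]
    by_cases hgt : r > mc
    · rw [if_pos hgt, h2, ih (k + 1) r (k : Int) (by omega) hrest]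
      by_cases hMr : pvMaxL rest > r
      · rw [if_pos hMr, if_pos (by rcases max_cases r (pvMaxL rest) with ⟨he, h3⟩ | ⟨he, h3⟩ <;> omega)]
        rw [max_eq_right (le_of_lt hMr)]
        have hne : r ≠ pvMaxL rest := by omega
        have hmem : pvMaxL rest ∈ rest := pvMaxL_mem' rest hrest (by omega)
        rw [PySem.List.index?_cons_of_ne rest hne]
        obtain ⟨j, hj⟩ := Option.isSome_iff_exists.mp ((PySem.List.index?_isSome_iff rest _).mpr hmem)
        rw [hj]
        simp only [Option.map_some, Option.getD_some]
        refine congrArg (Prod.mk (pvMaxL rest)) ?_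
        push_cast; ring
      · rw [if_neg hMr, if_pos (by rcases max_cases r (pvMaxL rest) with ⟨he, h3⟩ | ⟨he, h3⟩ <;> omega)]
        rw [max_eq_left (by omega), PySem.List.index?_cons_self]
        simp
    · rw [if_neg hgt, h2, ih (k + 1) mc lf hmc hrest]
      by_cases hMm : pvMaxL rest > mc
      · rw [if_pos hMm, if_pos (by rcases max_cases r (pvMaxL rest) with ⟨he, h3⟩ | ⟨he, h3⟩ <;> omega)]
        rw [max_eq_right (by omega)]
        have hne : r ≠ pvMaxL rest := by omega
        have hmem : pvMaxL rest ∈ rest := pvMaxL_mem' rest hrest (by omega)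
        rw [PySem.List.index?_cons_of_ne rest hne]
        obtain ⟨j, hj⟩ := Option.isSome_iff_exists.mp ((PySem.List.index?_isSome_iff rest _).mpr hmem)
        rw [hj]
        simp only [Option.map_some, Option.getD_some]
        refine congrArg (Prod.mk (pvMaxL rest)) ?_
        push_cast; ring
      · rw [if_neg hMm, if_neg (by rcases max_cases r (pvMaxL rest) with ⟨he, h3⟩ | ⟨he, h3⟩ <;> omega)]

theorem pvMax?_eq (runs : List Int) (h : ∀ r ∈ runs, 0 ≤ r) :
    (PySem.List.max? runs (fun x => x)).getD 0 = pvMaxL runs := by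
  cases runs with
  | nil =>
    rw [(PySem.List.max?_eq_none_iff ([] : List Int) (fun x => x)).mpr rfl]
    rfl
  | cons r rest =>
    obtain ⟨m, hm⟩ : ∃ m, PySem.List.max? (r :: rest) (fun x => x) = some m := by
      cases hx : PySem.List.max? (r :: rest) (fun x => x) with
      | none => exact absurd ((PySem.List.max?_eq_none_iff _ _).mp hx) (by simp)
      | some m => exact ⟨m, rfl⟩
    rw [hm, Option.getD_some]
    have hmem : m ∈ r :: rest := PySem.List.max?_mem hm
    have hle : pvMaxL (r :: rest) ≤ m := PySem.List.max?_isMax hm _ (pvMaxL_mem (r :: rest) (by simp) h)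
    have hge : m ≤ pvMaxL (r :: rest) := pvMaxL_ge (r :: rest) m hmem
    omega

-- ===== VERDICT (by name: the statement is the Claim_ definition above) =====
theorem Lab5_findLongestRepeatingNumbersRow_spec : Claim_equal_Lab5_findLongestRepeatingNumbersRow := by
  intro array _
  unfold Spec_Lab5_findLongestRepeatingNumbersRow
  unfold Lab5_findLongestRepeatingNumbersRow Lab5_findLongestRepeatingNumbersRow_alt
  dsimp only
  have hnn : ∀ r ∈ array.map pvB_run, 0 ≤ r := by
    intro r hr
    obtain ⟨row, _, rfl⟩ := List.mem_map.mp hr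
    exact pvB_run_nonneg row
  have h0 : PySem.List.enumerate array = PySem.List.enumerate array ((0 : Nat) : Int) := by norm_num
  rw [h0, pvOuter_eq array 0 0 (-1) (le_refl 0), pvScanR_eq _ 0 0 (-1) (le_refl 0) hnn]
  rw [pvMax?_eq _ hnn]
  by_cases h : pvMaxL (array.map pvB_run) > 0
  · rw [if_pos h, if_pos h]
    simp
  · rw [if_neg h, if_neg h]
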